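-- pv_equiv track=rewrite | github.com/AndreyKiritsa/-_- | twin_search.py | searchEnd
-- ===== SOURCE A (Python) =====
-- def searchEnd(massNum, index):#поиск конца индекса икомого элемента
--     end = index
--     ask = 0
--     flag = False
--     while flag != True:
--         if len(massNum)+1 == end+1 or massNum[index] != massNum[end]:
--             ask = end
--             flag = True
--         else:
--             end += 1
--     return ask
-- ===== SOURCE B (Python) =====
-- def searchEnd(massNum, index):
--     n = len(massNum)
--     if index >= n:
--         return n
--     v = massNum[index]
--
--     def run(lo, hi):
--         # length of the longest prefix of positions lo..hi-1 whose elements all equal v,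
--         # computed by divide and conquer: if the left half is entirely v, add the
--         # right half's prefix run, otherwise the left half's run is the answer.
--         if hi - lo <= 0:
--             return 0
--         if hi - lo == 1:
--             return 1 if massNum[lo] == v else 0
--         mid = lo + (hi - lo) // 2
--         left = run(lo, mid)
--         if left < mid - lo:
--             return left
--         return left + run(mid, hi)
--
--     return index + run(index, n)
-- ===== Notes on version B (the rewrite author's own statement) =====
-- stated objective: alternative
-- what changed: Replaces A's flag/ask linear while-loop by a divide-and-conquer recursion that computes the run length of massNum[index] over [index, n) by splitting the segment in half (take the left half's run; if the left half is all equal, add the right half's run); Pre_ excludes only inputs (index > len or index < -len) where A raises IndexError.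
import Mathlib
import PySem

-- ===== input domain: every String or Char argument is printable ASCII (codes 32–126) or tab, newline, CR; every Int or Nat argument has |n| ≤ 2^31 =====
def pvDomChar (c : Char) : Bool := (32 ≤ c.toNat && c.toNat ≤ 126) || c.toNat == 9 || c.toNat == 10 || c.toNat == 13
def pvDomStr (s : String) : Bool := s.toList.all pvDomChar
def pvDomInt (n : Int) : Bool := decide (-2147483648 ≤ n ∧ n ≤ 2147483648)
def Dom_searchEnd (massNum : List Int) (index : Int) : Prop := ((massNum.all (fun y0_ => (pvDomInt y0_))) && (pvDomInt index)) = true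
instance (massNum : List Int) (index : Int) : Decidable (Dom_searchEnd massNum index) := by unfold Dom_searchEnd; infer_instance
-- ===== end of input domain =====

-- B replaces A's flag/ask linear while-loop by a divide-and-conquer recursion computing the run
-- length of massNum[index] over [index, n) by halving the segment; same O(n) cost, different algorithm.


-- ===== PORT A =====
-- A's while-loop, state (end, ask, flag); ask/flag collapse into returning endv at the stop.
def searchEndLoop (massNum : List Int) (index : Int) (endv : Int) : Nat → Int
  | 0 => endv   -- fuel exhaustion is unreachable on Pre_ (the loop stops at end = len at the latest)
  | fuel + 1 =>
    if ((massNum.length : Int) + 1 == endv + 1)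
        || (PySem.List.pyGet? massNum index != PySem.List.pyGet? massNum endv) then
      endv
    else
      searchEndLoop massNum index (endv + 1) fuel

def searchEnd (massNum : List Int) (index : Int) : Int :=
  searchEndLoop massNum index index ((massNum.length + 1 - index).toNat)

-- ===== PORT B =====
-- run(lo, hi): length of the longest prefix of positions lo..hi-1 whose elements all equal v,
-- by divide and conquer: left half's run; if the left half is entirely v, add the right half's run.
-- (fuel = segment length bounds the recursion; it is never exhausted: each call strictly shrinks the segment)
def searchEndRun (massNum : List Int) (v : Int) : Nat → Int → Int → Int
  | 0, _, _ => 0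
  | fuel + 1, lo, hi =>
    if hi - lo ≤ 0 then 0
    else if hi - lo = 1 then (if PySem.List.pyGet? massNum lo == some v then 1 else 0)
    else
      let mid := lo + PySem.Int.floordiv (hi - lo) 2
      let left := searchEndRun massNum v fuel lo mid
      if left < mid - lo then left else left + searchEndRun massNum v fuel mid hi

def searchEnd_alt (massNum : List Int) (index : Int) : Int :=
  let n : Int := (massNum.length : Int)
  if index ≥ n then n
  else
    match PySem.List.pyGet? massNum index with
    | none => 0   -- v = massNum[index] raises IndexError; unreachable under Pre_
    | some v => index + searchEndRun massNum v ((n - index).toNat) index n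

-- ===== PRECONDITION & SPEC =====
-- Pre_ excludes exactly the inputs where A raises IndexError: index > len (massNum[index] out of
-- range) or index < -len (out of range even after Python's negative wraparound).
def Pre_searchEnd (massNum : List Int) (index : Int) : Prop :=
  -(massNum.length : Int) ≤ index ∧ index ≤ (massNum.length : Int)
instance (massNum : List Int) (index : Int) : Decidable (Pre_searchEnd massNum index) := by
  unfold Pre_searchEnd; infer_instance
def pvWitness_searchEnd : List Int × Int := ([1, 1, 2], 0)

def Spec_searchEnd (massNum : List Int) (index : Int) (out : Int) : Prop := out = searchEnd_alt massNum index
instance (massNum : List Int) (index : Int) (out : Int) : Decidable (Spec_searchEnd massNum index out) := by unfold Spec_searchEnd; infer_instance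

-- ===== CLAIM (what is proved, stated in full; the proofs are below) =====
def Claim_equal_searchEnd : Prop := ∀ (massNum : List Int) (index : Int), Dom_searchEnd massNum index → Pre_searchEnd massNum index → Spec_searchEnd massNum index (searchEnd massNum index)

-- ===== LEMMAS AND PROOFS =====

-- Both sides are characterised against the same reference value:
-- F lo hi = first position e in [lo, hi) with massNum[e] ≠ v, defaulting to hi.
def searchEndFirst (massNum : List Int) (v : Int) (lo hi : Int) : Int :=
  ((PySem.List.pyRange lo hi 1).find?
      (fun e => PySem.List.pyGet? massNum e != some v)).getD hi

theorem searchEndFirst_bounds (massNum : List Int) (v : Int) (lo hi : Int) (h : lo ≤ hi) :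
    lo ≤ searchEndFirst massNum v lo hi ∧ searchEndFirst massNum v lo hi ≤ hi := by
  unfold searchEndFirst
  cases hf : (PySem.List.pyRange lo hi 1).find?
      (fun e => PySem.List.pyGet? massNum e != some v) with
  | none => simp [h]
  | some x =>
    have hx := List.mem_of_find?_eq_some hf
    rw [PySem.List.mem_pyRange_one] at hx
    simp; omega

theorem searchEndFirst_append (massNum : List Int) (v : Int) (lo mid hi : Int)
    (h1 : lo ≤ mid) (h2 : mid ≤ hi) :
    searchEndFirst massNum v lo hi =
      if searchEndFirst massNum v lo mid < mid then searchEndFirst massNum v lo mid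
      else searchEndFirst massNum v mid hi := by
  unfold searchEndFirst
  rw [PySem.List.pyRange_one_append lo mid hi h1 h2, List.find?_append]
  cases hf : (PySem.List.pyRange lo mid 1).find?
      (fun e => PySem.List.pyGet? massNum e != some v) with
  | none =>
    simp [hf]
  | some x =>
    have hx := List.mem_of_find?_eq_some hf
    rw [PySem.List.mem_pyRange_one] at hx
    simp [hx.2]

theorem searchEndRun_eq (massNum : List Int) (v : Int) :
    ∀ (fuel : Nat) (lo hi : Int), lo ≤ hi → (hi - lo).toNat ≤ fuel →
      searchEndRun massNum v fuel lo hi = searchEndFirst massNum v lo hi - lo := by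
  intro fuel
  induction fuel with
  | zero =>
    intro lo hi hle hf
    have : hi = lo := by omega
    subst this
    simp [searchEndRun, searchEndFirst, PySem.List.pyRange_one_eq_nil le_rfl]
  | succ fuel ih =>
    intro lo hi hle hf
    by_cases h0 : hi - lo ≤ 0
    · have : hi = lo := by omega
      subst this
      simp [searchEndRun, searchEndFirst, PySem.List.pyRange_one_eq_nil le_rfl]
    · by_cases h1 : hi - lo = 1
      · have : hi = lo + 1 := by omega
        subst this
        simp only [searchEndRun, h0, h1, if_false, if_true, if_neg, if_pos]
        unfold searchEndFirst
        rw [PySem.List.pyRange_one_singleton]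
        by_cases hp : (PySem.List.pyGet? massNum lo != some v) = true
        · have hne : ¬ PySem.List.pyGet? massNum lo = some v := by simpa using hp
          simp [List.find?, hp, hne]
        · simp only [Bool.not_eq_true] at hp
          have heq : PySem.List.pyGet? massNum lo = some v := by simpa using hp
          simp [List.find?, heq]
      · simp only [searchEndRun, if_neg h0, if_neg h1]
        have hmid : PySem.Int.floordiv (hi - lo) 2 < hi - lo := by
          rw [PySem.Int.floordiv_lt_iff_lt_mul (by omega)]; omega
        have hmid1 : 1 ≤ PySem.Int.floordiv (hi - lo) 2 := by
          rw [PySem.Int.le_floordiv_iff_mul_le (by omega)]; omega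
        set m := lo + PySem.Int.floordiv (hi - lo) 2 with hm
        have hlom : lo ≤ m := by omega
        have hmhi : m ≤ hi := by omega
        have ihL := ih lo m hlom (by omega)
        have ihR := ih m hi hmhi (by omega)
        have hFL := searchEndFirst_bounds massNum v lo m hlom
        have hFR := searchEndFirst_bounds massNum v m hi hmhi
        rw [searchEndFirst_append massNum v lo m hi hlom hmhi]
        rw [ihL, ihR]
        by_cases hc : searchEndFirst massNum v lo m - lo < m - lo
        · rw [if_pos hc, if_pos (by omega)]
        · rw [if_neg hc, if_neg (by omega)]
          omega

theorem bne_comm_opt (a b : Option Int) : (a != b) = (b != a) := by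
  simp [bne]
  exact eq_comm

theorem searchEndLoop_eq_first (massNum : List Int) (index : Int) (v : Int)
    (hv : PySem.List.pyGet? massNum index = some v)
    (fuel : Nat) (endv : Int)
    (hle : endv ≤ (massNum.length : Int))
    (hfuel : ((massNum.length : Int) - endv).toNat < fuel) :
    searchEndLoop massNum index endv fuel =
      searchEndFirst massNum v endv (massNum.length : Int) := by
  induction fuel generalizing endv with
  | zero => omega
  | succ fuel ih =>
    unfold searchEndFirst
    by_cases hend : endv = (massNum.length : Int)
    · subst hend
      simp [searchEndLoop, PySem.List.pyRange_one_eq_nil le_rfl]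
    · have hlt : endv < (massNum.length : Int) := lt_of_le_of_ne hle hend
      rw [PySem.List.pyRange_one_cons hlt]
      simp only [searchEndLoop, List.find?]
      have hcond1 : ((massNum.length : Int) + 1 == endv + 1) = false := by
        simp; omega
      rw [hcond1, Bool.false_or, hv,
          bne_comm_opt (some v) (PySem.List.pyGet? massNum endv)]
      by_cases hp : (PySem.List.pyGet? massNum endv != some v) = true
      · simp [hp]
      · simp only [Bool.not_eq_true] at hp
        simp only [hp]
        have := ih (endv + 1) (by omega) (by omega)
        unfold searchEndFirst at this
        simpa using this

-- ===== VERDICT (by name: the statement is the Claim_ definition above) =====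
theorem searchEnd_spec : Claim_equal_searchEnd := by
  intro massNum index _ hpre
  unfold Spec_searchEnd searchEnd searchEnd_alt
  by_cases hge : index ≥ (massNum.length : Int)
  · have hix : index = (massNum.length : Int) := le_antisymm hpre.2 hge
    rw [if_pos hge, hix]
    have hf : ((massNum.length : Int) + 1 - (massNum.length : Int)).toNat = 1 := by omega
    rw [hf]
    simp [searchEndLoop]
  · rw [if_neg hge]
    have hsome : ∃ v, PySem.List.pyGet? massNum index = some v := by
      cases hc : PySem.List.pyGet? massNum index with
      | some v => exact ⟨v, rfl⟩
      | none =>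
        rw [PySem.List.pyGet?_eq_none_iff] at hc
        exfalso
        apply hc
        simp [PySem.Raise.InRange]
        constructor
        · have := hpre.1; omega
        · omega
    obtain ⟨v, hv⟩ := hsome
    rw [hv]
    dsimp only
    rw [searchEndLoop_eq_first massNum index v hv _ index hpre.2 (by omega)]
    rw [searchEndRun_eq massNum v (((massNum.length : Int) - index).toNat) index (massNum.length : Int) hpre.2 le_rfl]
    omega
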